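-- pv_equiv track=rewrite | github.com/PyEldar/PyIrisCache | calculator.py | order_data
-- ===== SOURCE A (Python) =====
-- from collections import OrderedDict
--
-- def order_data(data):
--     """Orders dict by keys"""
--     result = OrderedDict()
--
--     # create default dict with keys in format 'hour,minute'
--     for i in range(24):
--         for j in range(6):
--             result['{},{}'.format(i, j)] = 0
--
--     for key, value in sorted(data.items()):
--         result[key] = value
--
--     return result
-- ===== SOURCE B (Python) =====
-- from collections import OrderedDict
--
-- def order_data(data):
--     """Orders dict by keys"""
--     index = {'{},{}'.format(i, j): i * 6 + j for i in range(24) for j in range(6)}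
--     slots = [0] * 144
--     extras = []
--     for key, value in data.items():
--         pos = index.get(key)
--         if pos is None:
--             extras.append((key, value))
--         else:
--             slots[pos] = value
--     result = OrderedDict((key, slots[pos]) for key, pos in index.items())
--     result.update(sorted(extras))
--     return result
-- ===== Notes on version B (the rewrite author's own statement) =====
-- stated objective: alternative
-- what changed: A materialises the 144-key default dict and destructively overlays every item of the fully sorted data onto it; B never overlays: it scatters each data item once by a precomputed key->position index into a 144-slot array (non-grid items collected aside), then emits the array by position and appends only the sorted extras, so only the non-grid subset is sorted.
import Mathlib
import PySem

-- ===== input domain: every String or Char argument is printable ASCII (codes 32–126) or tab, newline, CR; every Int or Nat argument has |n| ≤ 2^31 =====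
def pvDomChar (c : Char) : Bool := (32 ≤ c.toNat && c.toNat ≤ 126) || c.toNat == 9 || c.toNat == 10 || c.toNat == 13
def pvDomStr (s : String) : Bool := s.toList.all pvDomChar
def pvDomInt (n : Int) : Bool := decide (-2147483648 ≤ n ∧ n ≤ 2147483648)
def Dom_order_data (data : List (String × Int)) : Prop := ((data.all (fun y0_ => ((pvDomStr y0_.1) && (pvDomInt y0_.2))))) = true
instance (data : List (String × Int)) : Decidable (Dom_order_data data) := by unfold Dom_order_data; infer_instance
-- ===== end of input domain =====

set_option maxRecDepth 10000

-- B replaces A's build-default-dict-then-overlay-all-sorted-items with direct addressing: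
-- a key→position index scatters each item once into a 144-slot array (non-grid items set
-- aside), the array is emitted by position and only the sorted non-grid extras are appended.

-- '{},{}'.format(i, j), shared by both ports
def pvFmt (i j : Int) : String := String.ofList (PySem.Int.toChars i ++ ',' :: PySem.Int.toChars j)

-- ===== PORT A =====
def order_data (data : List (String × Int)) : List (String × Int) :=
  let result : PySem.Dict String Int :=
    (PySem.List.pyRange 0 24 1).foldl (fun r i =>
      (PySem.List.pyRange 0 6 1).foldl (fun r j => r.insert (pvFmt i j) 0) r)
      PySem.Dict.empty
  let result := (PySem.List.sorted2 data Prod.fst Prod.snd).foldl (fun r p => r.insert p.1 p.2) result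
  result.items

-- ===== PORT B =====
-- index = {fmt(i,j): i*6+j for i in range(24) for j in range(6)}
def pvIndex : PySem.Dict String Int :=
  PySem.Dict.ofList ((PySem.List.pyRange 0 24 1).flatMap (fun i =>
    (PySem.List.pyRange 0 6 1).map (fun j => (pvFmt i j, i * 6 + j))))

-- loop body of 'for key, value in data.items(): …' (slots[pos] = value is in range by
-- construction: every index value is 0..143 — pySetD/pyGetD are exact there)
def pvStep (st : List Int × List (String × Int)) (p : String × Int) :
    List Int × List (String × Int) :=
  match pvIndex.get? p.1 with
  | none => (st.1, st.2 ++ [p])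
  | some pos => (PySem.List.pySetD st.1 pos p.2, st.2)

def order_data_alt (data : List (String × Int)) : List (String × Int) :=
  let st := data.foldl pvStep (List.replicate 144 0, [])
  let result := PySem.Dict.ofList
    (pvIndex.items.map (fun q => (q.1, PySem.List.pyGetD st.1 q.2 0)))
  let result := result.update (PySem.List.sorted2 st.2 Prod.fst Prod.snd)
  result.items

-- ===== PRECONDITION & SPEC =====
-- Pre_ requires pairwise-distinct keys: the parameter is a Python dict, and an association
-- list with a duplicated key represents no dict input at all (Python dicts cannot hold one).
def Pre_order_data (data : List (String × Int)) : Prop := (data.map Prod.fst).Nodup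
instance (data : List (String × Int)) : Decidable (Pre_order_data data) := by unfold Pre_order_data; infer_instance
def pvWitness_order_data : (List (String × Int)) := [("0,0", 3), ("zzz", -1)]

def Spec_order_data (data : List (String × Int)) (out : List (String × Int)) : Prop := out = order_data_alt data
instance (data : List (String × Int)) (out : List (String × Int)) : Decidable (Spec_order_data data out) := by unfold Spec_order_data; infer_instance

-- ===== CLAIM (what is proved, stated in full; the proofs are below) =====
def Claim_equal_order_data : Prop := ∀ (data : List (String × Int)), Dom_order_data data → Pre_order_data data → Spec_order_data data (order_data data)

-- ===== LEMMAS AND PROOFS =====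

-- the 144 grid keys in grid order (proof-side name for the key list)
def pvDefaults : List String :=
  (PySem.List.pyRange 0 24 1).flatMap (fun i => (PySem.List.pyRange 0 6 1).map (fun j => pvFmt i j))

-- the key sitting at slot n
def pvKey (n : Nat) : String := pvDefaults.getD n ""

-- the (key, position) pairs B's index is built from
def pvPairs : List (String × Int) :=
  (PySem.List.pyRange 0 24 1).flatMap (fun i =>
    (PySem.List.pyRange 0 6 1).map (fun j => (pvFmt i j, i * 6 + j)))

set_option maxRecDepth 1000000 in
theorem pvDefaults_nodup : pvDefaults.Nodup := by decide

set_option maxRecDepth 1000000 in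
theorem pvDefaults_eq : pvDefaults = (List.range 144).map pvKey := by rfl

set_option maxRecDepth 1000000 in
theorem pvPairs_eq : pvPairs = (List.range 144).map (fun n => (pvKey n, (n : Int))) := by rfl

theorem pvPairs_fst_nodup : (pvPairs.map (fun p => p.1)).Nodup := by
  rw [pvPairs_eq, List.map_map]
  show ((List.range 144).map pvKey).Nodup
  rw [← pvDefaults_eq]
  exact pvDefaults_nodup

theorem pvIndex_items : pvIndex.items = (List.range 144).map (fun n => (pvKey n, (n : Int))) := by
  have h1 : pvIndex.items = PySem.Dict.empty.items ++ pvPairs.map (fun p => (p.1, p.2)) := by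
    show (pvPairs.foldl (fun acc p => acc.insert p.1 p.2) PySem.Dict.empty).items = _
    rw [PySem.Dict.items_foldl_insert_fresh pvPairs
      (fun p : String × Int => p.1) (fun p : String × Int => p.2) PySem.Dict.empty
      (by intro a _; simp [PySem.Dict.contains_empty]) pvPairs_fst_nodup]
  rw [h1]
  simp only [Prod.mk.eta, List.map_id']
  rw [show (PySem.Dict.empty : PySem.Dict String Int).items = [] from rfl, List.nil_append]
  exact pvPairs_eq

-- A's nested default-building loop is the single fold over the flattened (key, 0) pairs
theorem pvInit_fold_eq (l : List Int) :
    ∀ d : PySem.Dict String Int,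
    l.foldl (fun r i =>
        (PySem.List.pyRange 0 6 1).foldl (fun r j => r.insert (pvFmt i j) 0) r) d
      = (l.flatMap (fun i =>
          (PySem.List.pyRange 0 6 1).map (fun j => (pvFmt i j, (0 : Int))))).foldl
          (fun acc p => acc.insert p.1 p.2) d := by
  induction l with
  | nil => intro d; rfl
  | cons x t ih =>
    intro d
    rw [List.flatMap_cons, List.foldl_append, List.foldl_map, List.foldl_cons, ih]

set_option maxRecDepth 1000000 in
theorem pvInitPairs_fst :
    ((PySem.List.pyRange 0 24 1).flatMap (fun i =>
      (PySem.List.pyRange 0 6 1).map (fun j => (pvFmt i j, (0 : Int))))).map (fun p => p.1)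
    = pvDefaults := by rfl

-- A's default-building nested loop produces exactly the dict of pvDefaults with value 0
set_option maxRecDepth 1000000 in
theorem pvInitDict_eq :
    ((PySem.List.pyRange 0 24 1).foldl (fun r i =>
      (PySem.List.pyRange 0 6 1).foldl (fun r j => r.insert (pvFmt i j) 0) r)
      (PySem.Dict.empty : PySem.Dict String Int))
    = PySem.Dict.mk (pvDefaults.map (fun k => (k, 0))) := by
  apply PySem.Dict.ext
  rw [pvInit_fold_eq,
    PySem.Dict.items_foldl_insert_fresh
      ((PySem.List.pyRange 0 24 1).flatMap (fun i =>
        (PySem.List.pyRange 0 6 1).map (fun j => (pvFmt i j, (0 : Int)))))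
      (fun p : String × Int => p.1) (fun p : String × Int => p.2) PySem.Dict.empty
      (by intro a _; simp [PySem.Dict.contains_empty])
      (by rw [pvInitPairs_fst]; exact pvDefaults_nodup)]
  simp only [Prod.mk.eta, List.map_id']
  rw [show (PySem.Dict.empty : PySem.Dict String Int).items = [] from rfl, List.nil_append]
  rfl

theorem pvIndex_keys : pvIndex.keys = pvDefaults := by
  show pvIndex.items.map (·.1) = pvDefaults
  rw [pvIndex_items, List.map_map, pvDefaults_eq]
  apply List.map_congr_left
  intro n _
  rfl

theorem pvIndex_keys_nodup : pvIndex.keys.Nodup := by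
  rw [pvIndex_keys]; exact pvDefaults_nodup

-- F←: the key of slot n is indexed at position n
theorem pvIndex_get?_key {n : Nat} (hn : n < 144) : pvIndex.get? (pvKey n) = some (n : Int) := by
  refine PySem.Dict.get?_of_mem_items _ ?_ pvIndex_keys_nodup
  rw [pvIndex_items]
  exact List.mem_map_of_mem (List.mem_range.mpr hn)

-- F→: every successful index lookup names a slot
theorem pvIndex_get?_inv {k : String} {v : Int} (h : pvIndex.get? k = some v) :
    0 ≤ v ∧ v.toNat < 144 ∧ k = pvKey v.toNat := by
  have hm := PySem.Dict.mem_items_of_get?_eq_some _ h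
  rw [pvIndex_items] at hm
  obtain ⟨n, hn, he⟩ := List.mem_map.mp hm
  obtain ⟨h1, h2⟩ := Prod.mk.injEq .. ▸ he
  subst h2
  refine ⟨Int.natCast_nonneg n, ?_, ?_⟩
  · simpa using List.mem_range.mp hn
  · simp [h1]

-- a key is not indexed iff it is not a grid key
theorem pvIndex_get?_none_iff (k : String) : pvIndex.get? k = none ↔ k ∉ pvDefaults := by
  rw [PySem.Dict.get?_eq_none_iff_not_mem_keys, pvIndex_keys]

-- first-match lookup is permutation-invariant when the keys are pairwise distinct
theorem pvGet?_perm {l l' : List (String × Int)} (hp : l.Perm l')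
    (hn : (l.map Prod.fst).Nodup) (k : String) :
    (PySem.Dict.mk l).get? k = (PySem.Dict.mk l').get? k := by
  have hn' : (l'.map Prod.fst).Nodup := (hp.map Prod.fst).nodup_iff.mp hn
  cases h : (PySem.Dict.mk l').get? k with
  | some v =>
    have hm : (k, v) ∈ l' := by
      simpa using (PySem.Dict.get?_eq_some_iff_mem_items (PySem.Dict.mk l') k v
        (by simpa [PySem.Dict.keys_mk] using hn')).mp h
    exact (PySem.Dict.get?_eq_some_iff_mem_items (PySem.Dict.mk l) k v
      (by simpa [PySem.Dict.keys_mk] using hn)).mpr (by simpa using hp.mem_iff.mpr hm)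
  | none =>
    have hk : k ∉ (PySem.Dict.mk l').keys :=
      (PySem.Dict.get?_eq_none_iff_not_mem_keys _ k).mp h
    apply (PySem.Dict.get?_eq_none_iff_not_mem_keys _ k).mpr
    simp only [PySem.Dict.keys_mk] at hk ⊢
    exact fun hmem => hk ((hp.map Prod.fst).mem_iff.mp (by simpa using hmem))

-- overlaying a list of pairs with distinct keys onto a dict with distinct keys:
-- present keys are updated in place, fresh keys are appended in list order
theorem pvFoldl_insert_items (ps : List (String × Int)) :
    ∀ (d : PySem.Dict String Int), d.keys.Nodup → (ps.map Prod.fst).Nodup →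
    (ps.foldl (fun r p => r.insert p.1 p.2) d).items
      = d.items.map (fun q => (q.1, ((PySem.Dict.mk ps).get? q.1).getD q.2))
        ++ ps.filter (fun p => !(d.contains p.1)) := by
  induction ps with
  | nil =>
    intro d _ _
    simp [PySem.Dict.get?]
  | cons p tl ih =>
    obtain ⟨a, b⟩ := p
    intro d hd hn
    rw [List.map_cons, List.nodup_cons] at hn
    obtain ⟨hp1, htl⟩ := hn
    have hget_tl_p : (PySem.Dict.mk tl).get? a = none := by
      rw [PySem.Dict.get?_eq_none_iff_not_mem_keys]
      simpa [PySem.Dict.keys_mk] using hp1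
    have step : (((a, b) :: tl).foldl (fun r p => r.insert p.1 p.2) d)
        = tl.foldl (fun r p => r.insert p.1 p.2) (d.insert a b) := rfl
    rw [step, ih (d.insert a b) (PySem.Dict.nodup_keys_insert d a b hd) htl]
    by_cases hc : d.contains a = true
    · rw [PySem.Dict.items_insert_of_contains d b hc]
      rw [List.filter_cons_of_neg (by simp [hc])]
      have hfilters : tl.filter (fun q => !((d.insert a b).contains q.1))
          = tl.filter (fun q => !(d.contains q.1)) := by
        apply List.filter_congr
        intro q hq
        have hqne : q.1 ≠ a := by
          intro h
          exact hp1 (by simpa [h] using List.mem_map_of_mem (f := Prod.fst) hq)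
        simp [PySem.Dict.contains_insert, hqne]
      rw [hfilters]
      congr 1
      rw [List.map_map]
      apply List.map_congr_left
      intro q _
      by_cases hq : q.1 = a
      · simp [hq, PySem.Dict.get?_mk_cons, hget_tl_p]
      · have hne : a ≠ q.1 := fun h => hq h.symm
        simp [hq, PySem.Dict.get?_mk_cons, hne]
    · have hc' : d.contains a = false := by simpa using hc
      rw [PySem.Dict.items_insert_of_not_contains d b hc']
      have hp1d : a ∉ d.keys := by
        rw [← PySem.Dict.contains_iff_mem_keys]; simp [hc']
      have hfilters : tl.filter (fun q => !((d.insert a b).contains q.1))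
          = tl.filter (fun q => !(d.contains q.1)) := by
        apply List.filter_congr
        intro q hq
        have hqne : q.1 ≠ a := by
          intro h
          exact hp1 (by simpa [h] using List.mem_map_of_mem (f := Prod.fst) hq)
        simp [PySem.Dict.contains_insert, hqne]
      rw [hfilters, List.map_append, List.filter_cons_of_pos (by simp [hc'])]
      have hhead : d.items.map (fun q => (q.1, ((PySem.Dict.mk tl).get? q.1).getD q.2))
          = d.items.map (fun q => (q.1, ((PySem.Dict.mk ((a, b) :: tl)).get? q.1).getD q.2)) := by
        apply List.map_congr_left
        intro q hq
        have hqne : a ≠ q.1 :=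
          fun h => hp1d (h ▸ PySem.Dict.mem_keys_of_mem_items d hq)
        simp [PySem.Dict.get?_mk_cons, hqne]
      rw [← hhead]
      rw [List.map_cons]
      simp [hget_tl_p]

-- ==== the scatter loop ====

theorem pvStep_extras (l : List (String × Int)) :
    ∀ st : List Int × List (String × Int),
    (l.foldl pvStep st).2 = st.2 ++ l.filter (fun p => decide (pvIndex.get? p.1 = none)) := by
  induction l with
  | nil => intro st; simp
  | cons p tl ih =>
    intro st
    rw [List.foldl_cons, ih]
    cases h : pvIndex.get? p.1 with
    | none => simp [pvStep, h]
    | some pos => simp [pvStep, h]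

-- slot n after the scatter = last value written at grid key n (fold form)
theorem pvStep_slots_getD (l : List (String × Int)) {n : Nat} (hn : n < 144) :
    ∀ st : List Int × List (String × Int), st.1.length = 144 →
    (l.foldl pvStep st).1.getD n 0
      = l.foldl (fun acc p => if p.1 = pvKey n then p.2 else acc) (st.1.getD n 0) := by
  have hkmem : pvKey n ∈ pvDefaults := by
    rw [pvDefaults_eq]; exact List.mem_map_of_mem (List.mem_range.mpr hn)
  induction l with
  | nil => intro st _; rfl
  | cons p tl ih =>
    intro st hst
    rw [List.foldl_cons, List.foldl_cons]
    cases h : pvIndex.get? p.1 with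
    | none =>
      have hne : p.1 ≠ pvKey n := by
        intro he
        exact ((pvIndex_get?_none_iff p.1).mp h) (he ▸ hkmem)
      have hstep : pvStep st p = (st.1, st.2 ++ [p]) := by simp [pvStep, h]
      rw [hstep, ih _ (by simpa using hst)]
      simp [hne]
    | some pos =>
      obtain ⟨hp0, hplt, hpk⟩ := pvIndex_get?_inv h
      have hstep : pvStep st p = (PySem.List.pySetD st.1 pos p.2, st.2) := by simp [pvStep, h]
      rw [hstep, ih _ (by simp [PySem.List.length_pySetD, hst]),
        PySem.List.pySetD_of_nonneg _ _ hp0]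
      by_cases hk : p.1 = pvKey n
      · have : pvIndex.get? (pvKey n) = some pos := hk ▸ h
        rw [pvIndex_get?_key hn] at this
        have hpn : pos.toNat = n := by
          have := Option.some.inj this
          omega
        rw [if_pos hk]
        congr 1
        rw [List.getD_eq_getElem?_getD, List.getElem?_set, if_pos hpn,
          if_pos (by omega : pos.toNat < st.1.length)]
        rfl
      · have hmn : pos.toNat ≠ n := by
          intro he
          exact hk (by rw [hpk, he])
        rw [if_neg hk]
        congr 1
        rw [List.getD_eq_getElem?_getD, List.getElem?_set, if_neg hmn,
          ← List.getD_eq_getElem?_getD]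

-- with pairwise-distinct keys, "last value or default" is the dict lookup
theorem pvLastVal_eq_get? (l : List (String × Int)) (k : String) (d : Int)
    (hn : (l.map Prod.fst).Nodup) :
    l.foldl (fun acc p => if p.1 = k then p.2 else acc) d
      = ((PySem.Dict.mk l).get? k).getD d := by
  induction l generalizing d with
  | nil => simp [PySem.Dict.get?]
  | cons p tl ih =>
    rw [List.map_cons, List.nodup_cons] at hn
    obtain ⟨hp1, htl⟩ := hn
    rw [List.foldl_cons, PySem.Dict.get?_mk_cons]
    by_cases hk : p.1 = k
    · have hnone : ∀ q ∈ tl, q.1 ≠ k := by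
        intro q hq he
        exact hp1 (by simpa [he, ← hk] using List.mem_map_of_mem (f := Prod.fst) hq)
      have hfold : List.foldl (fun acc q => if q.1 = k then q.2 else acc)
          (if p.1 = k then p.2 else d) tl = (if p.1 = k then p.2 else d) := by
        rw [PySem.List.foldl_congr_mem tl _ (fun acc _ => acc) _
          (by intro acc q hq; simp [hnone q hq]), PySem.List.foldl_ignore]
      rw [hfold, if_pos hk, if_pos (by simp [hk])]
      rfl
    · rw [if_neg hk, if_neg (by simp [hk]), ih _ htl]

-- ==== sorting ====

theorem pvInsertBy_congr {α : Type} (b1 b2 : α → α → Bool) (x : α) :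
    ∀ ys : List α, (∀ y ∈ ys, b1 x y = b2 x y) →
    PySem.List.insertBy b1 x ys = PySem.List.insertBy b2 x ys := by
  intro ys
  induction ys with
  | nil => intro _; rfl
  | cons y ys ih =>
    intro h
    show (if b1 x y then x :: y :: ys else y :: PySem.List.insertBy b1 x ys)
      = (if b2 x y then x :: y :: ys else y :: PySem.List.insertBy b2 x ys)
    rw [h y (List.mem_cons_self ..), ih (fun z hz => h z (List.mem_cons_of_mem _ hz))]

theorem pvFoldl_insertBy_congr {α : Type} (b1 b2 : α → α → Bool) (S : List α)
    (hb : ∀ x ∈ S, ∀ y ∈ S, b1 x y = b2 x y) :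
    ∀ (l acc : List α), (∀ x ∈ l, x ∈ S) → (∀ x ∈ acc, x ∈ S) →
    l.foldl (fun acc x => PySem.List.insertBy b1 x acc) acc
      = l.foldl (fun acc x => PySem.List.insertBy b2 x acc) acc := by
  intro l
  induction l with
  | nil => intro acc _ _; rfl
  | cons x t ih =>
    intro acc hl hacc
    rw [List.foldl_cons, List.foldl_cons,
      pvInsertBy_congr b1 b2 x acc (fun y hy => hb x (hl x (List.mem_cons_self ..)) y (hacc y hy))]
    apply ih _ (fun z hz => hl z (List.mem_cons_of_mem _ hz))
    intro z hz
    rcases (PySem.List.mem_insertBy ..).mp hz with h | h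
    · exact h ▸ hl x (List.mem_cons_self ..)
    · exact hacc z h

-- on a list with pairwise-distinct keys the pair sort is the key sort
theorem pvSorted2_eq_sorted (xs : List (String × Int)) (hn : (xs.map Prod.fst).Nodup) :
    PySem.List.sorted2 xs Prod.fst Prod.snd = PySem.List.sorted xs Prod.fst := by
  show xs.foldl (fun acc x => PySem.List.insertBy
      (fun a b => decide (a.1 < b.1) || !decide (b.1 < a.1) && decide (a.2 < b.2)) x acc) []
    = xs.foldl (fun acc x => PySem.List.insertBy (fun a b => decide (a.1 < b.1)) x acc) []
  apply pvFoldl_insertBy_congr _ _ xs _ xs [] (fun x hx => hx) (by simp)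
  intro a ha b hb
  by_cases hab : a.1 = b.1
  · have : a = b := List.inj_on_of_nodup_map hn ha hb hab
    subst this
    simp
  · rcases lt_or_gt_of_ne hab with h | h
    · simp [h]
    · simp [h.not_gt, h]

-- sorting commutes with filtering (distinct keys)
theorem pvSorted_filter (xs : List (String × Int)) (q : String × Int → Bool)
    (hn : (xs.map Prod.fst).Nodup) :
    PySem.List.sorted (xs.filter q) Prod.fst = (PySem.List.sorted xs Prod.fst).filter q := by
  apply PySem.List.sorted_eq_of_perm_of_pairwise_lt
  · exact (PySem.List.sorted_perm xs Prod.fst false).filter q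
  · have hle := PySem.List.sorted_pairwise xs Prod.fst
    have hnd : ((PySem.List.sorted xs Prod.fst false).map Prod.fst).Nodup :=
      (((PySem.List.sorted_perm xs Prod.fst false).map Prod.fst)).nodup_iff.mpr hn
    have hne : (PySem.List.sorted xs Prod.fst false).Pairwise (fun a b => a.1 ≠ b.1) :=
      List.pairwise_map.mp hnd
    exact ((hle.and hne).imp (fun h => lt_of_le_of_ne h.1 h.2)).filter q

-- ===== VERDICT (by name: the statement is the Claim_ definition above) =====
set_option maxHeartbeats 1000000 in
theorem order_data_spec : Claim_equal_order_data := by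
  intro data _ hpre
  unfold Spec_order_data order_data order_data_alt PySem.Dict.ofList PySem.Dict.update
  have hSperm := PySem.List.sorted2_perm data Prod.fst Prod.snd false
  have hSn : ((PySem.List.sorted2 data Prod.fst Prod.snd).map Prod.fst).Nodup :=
    (hSperm.map Prod.fst).nodup_iff.mpr hpre
  -- A's side: init dict, then the overlay lemma
  rw [pvInitDict_eq,
    pvFoldl_insert_items (PySem.List.sorted2 data Prod.fst Prod.snd)
      (PySem.Dict.mk (pvDefaults.map (fun k => (k, 0))))
      (by simpa [PySem.Dict.keys_mk, List.map_map] using pvDefaults_nodup) hSn]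
  -- B's side: the two output constructions append fresh distinct keys
  set st := data.foldl pvStep (List.replicate 144 0, []) with hstdef
  have hextras : st.2 = data.filter (fun p => decide (pvIndex.get? p.1 = none)) := by
    rw [hstdef, pvStep_extras]; simp
  have hexn : (st.2.map Prod.fst).Nodup := by
    rw [hextras]
    exact hpre.sublist (List.filter_sublist.map Prod.fst)
  have hsen : ((PySem.List.sorted2 st.2 Prod.fst Prod.snd).map Prod.fst).Nodup :=
    ((PySem.List.sorted2_perm st.2 Prod.fst Prod.snd false).map Prod.fst).nodup_iff.mpr hexn
  have hMfst : ((pvIndex.items.map (fun q => (q.1, PySem.List.pyGetD st.1 q.2 0))).map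
      (fun p => p.1)) = pvDefaults := by
    rw [List.map_map, pvIndex_items, List.map_map]
    show (List.range 144).map pvKey = pvDefaults
    rw [← pvDefaults_eq]
  have hres0 : ((pvIndex.items.map (fun q => (q.1, PySem.List.pyGetD st.1 q.2 0))).foldl
      (fun acc p => acc.insert p.1 p.2) PySem.Dict.empty).items
      = pvIndex.items.map (fun q => (q.1, PySem.List.pyGetD st.1 q.2 0)) := by
    rw [PySem.Dict.items_foldl_insert_fresh
      (pvIndex.items.map (fun q => (q.1, PySem.List.pyGetD st.1 q.2 0)))
      (fun p : String × Int => p.1) (fun p : String × Int => p.2) PySem.Dict.empty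
      (by intro a _; simp [PySem.Dict.contains_empty])
      (by rw [hMfst]; exact pvDefaults_nodup)]
    simp [PySem.Dict.empty, Prod.mk.eta]
  have hkeys0 : ((pvIndex.items.map (fun q => (q.1, PySem.List.pyGetD st.1 q.2 0))).foldl
      (fun acc p => acc.insert p.1 p.2) PySem.Dict.empty).keys = pvDefaults := by
    rw [PySem.Dict.keys_foldl_insert_key
      (pvIndex.items.map (fun q => (q.1, PySem.List.pyGetD st.1 q.2 0)))
      (fun p : String × Int => p.1) (fun d p => p.2) PySem.Dict.empty,
      PySem.Dict.keys_empty, PySem.Set.update_nil_left,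
      PySem.Set.ofList_eq_self_of_nodup _ (by rw [hMfst]; exact pvDefaults_nodup), hMfst]
  have hfresh2 : ∀ p ∈ PySem.List.sorted2 st.2 Prod.fst Prod.snd,
      ((pvIndex.items.map (fun q => (q.1, PySem.List.pyGetD st.1 q.2 0))).foldl
        (fun acc p => acc.insert p.1 p.2) PySem.Dict.empty).contains p.1 = false := by
    intro p hp
    have hp2 : p ∈ st.2 := ((PySem.List.sorted2_perm st.2 Prod.fst Prod.snd false).mem_iff).mp hp
    rw [hextras] at hp2
    have hnone : pvIndex.get? p.1 = none := by simpa using (List.mem_filter.mp hp2).2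
    have hnd : p.1 ∉ pvDefaults := (pvIndex_get?_none_iff p.1).mp hnone
    rw [PySem.Dict.contains_eq_decide_mem_keys, hkeys0]
    simpa using hnd
  rw [PySem.Dict.items_foldl_insert_fresh (PySem.List.sorted2 st.2 Prod.fst Prod.snd)
      (fun p : String × Int => p.1) (fun p : String × Int => p.2) _ hfresh2 hsen, hres0]
  simp only [Prod.mk.eta, List.map_id']
  -- heads
  have hhead :
      (PySem.Dict.mk (pvDefaults.map (fun k => (k, (0 : Int))))).items.map
          (fun q => (q.1,
            ((PySem.Dict.mk (PySem.List.sorted2 data Prod.fst Prod.snd)).get? q.1).getD q.2))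
        = pvIndex.items.map (fun q => (q.1, PySem.List.pyGetD st.1 q.2 0)) := by
    rw [show (PySem.Dict.mk (pvDefaults.map (fun k => (k, (0 : Int))))).items
        = pvDefaults.map (fun k => (k, (0 : Int))) from rfl]
    rw [List.map_map, pvIndex_items, List.map_map, pvDefaults_eq, List.map_map]
    apply List.map_congr_left
    intro n hnr
    have hn144 : n < 144 := List.mem_range.mp hnr
    show (pvKey n,
        ((PySem.Dict.mk (PySem.List.sorted2 data Prod.fst Prod.snd)).get? (pvKey n)).getD 0)
      = (pvKey n, PySem.List.pyGetD st.1 (n : Int) 0)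
    have h1 : PySem.List.pyGetD st.1 (n : Int) 0 = st.1.getD n 0 := by
      simp
    have hz : ((List.replicate 144 (0 : Int), ([] : List (String × Int))).1.getD n 0) = 0 := by
      show (List.replicate 144 (0 : Int)).getD n 0 = 0
      rw [List.getD_eq_getElem?_getD, List.getElem?_replicate]
      simp [hn144]
    have h2 : st.1.getD n 0 = ((PySem.Dict.mk data).get? (pvKey n)).getD 0 := by
      rw [hstdef, pvStep_slots_getD data hn144 (List.replicate 144 0, []) (by simp), hz,
        pvLastVal_eq_get? data (pvKey n) 0 hpre]
    rw [h1, h2, pvGet?_perm hSperm hSn (pvKey n)]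
  -- tails
  have htail : (PySem.List.sorted2 data Prod.fst Prod.snd).filter
        (fun p => !((PySem.Dict.mk (pvDefaults.map (fun k => (k, (0 : Int))))).contains p.1))
      = PySem.List.sorted2 st.2 Prod.fst Prod.snd := by
    have hfe : (PySem.List.sorted2 data Prod.fst Prod.snd).filter
        (fun p => !((PySem.Dict.mk (pvDefaults.map (fun k => (k, (0 : Int))))).contains p.1))
        = (PySem.List.sorted2 data Prod.fst Prod.snd).filter
          (fun p => decide (pvIndex.get? p.1 = none)) := by
      apply List.filter_congr
      intro p _
      rw [PySem.Dict.contains_eq_decide_mem_keys]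
      have hkm : (PySem.Dict.mk (pvDefaults.map (fun k => (k, (0 : Int))))).keys = pvDefaults := by
        simp only [PySem.Dict.keys_mk, List.map_map]
        have hid : ∀ k ∈ pvDefaults,
            ((fun x : String × Int => x.1) ∘ fun k : String => (k, (0 : Int))) k = id k :=
          fun _ _ => rfl
        rw [List.map_congr_left hid, List.map_id]
      rw [hkm]
      by_cases hmem : p.1 ∈ pvDefaults
      · have hne : ¬ (pvIndex.get? p.1 = none) := fun h => (pvIndex_get?_none_iff p.1).mp h hmem
        simp [hmem, hne]
      · simp [hmem, (pvIndex_get?_none_iff p.1).mpr hmem]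
    have hfn : ((data.filter (fun p => decide (pvIndex.get? p.1 = none))).map Prod.fst).Nodup :=
      hpre.sublist (List.filter_sublist.map Prod.fst)
    rw [hfe, hextras, pvSorted2_eq_sorted _ hfn, pvSorted2_eq_sorted data hpre,
      pvSorted_filter data _ hpre]
  rw [hhead, htail]
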